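-- pv_equiv track=rewrite | github.com/bangyen/python-fsa | src/python_fsa/automaton.py | _initialize_minimization_table
-- ===== SOURCE A (Python) =====
-- def _initialize_minimization_table(
--     num_states: int, accepting_states: set[int]
-- ) -> list[list[int]]:
--     """
--     Initialize the minimization table with accepting/non-accepting distinction.
--
--     Args:
--         num_states: Total number of states in the FSA.
--         accepting_states: Set of accepting state indices.
--
--     Returns:
--         Initialized table with 1s marking distinguishable state pairs.
--     """
--     table = [[0 for _ in range(num_states)] for _ in range(num_states)]
--
--     # Mark pairs where one state is accepting and the other is not
--     for i in range(num_states):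
--         for j in range(i):
--             if (i in accepting_states) != (j in accepting_states):
--                 table[i][j] = table[j][i] = 1
--
--     return table
-- ===== SOURCE B (Python) =====
-- def _initialize_minimization_table(
--     num_states: int, accepting_states: set[int]
-- ) -> list[list[int]]:
--     acc = [s for s in range(num_states) if s in accepting_states]
--     non = [s for s in range(num_states) if s not in accepting_states]
--     table = [[0] * num_states for _ in range(num_states)]
--     for i in acc:
--         for j in non:
--             table[i][j] = table[j][i] = 1
--     return table
-- ===== Notes on version B (the rewrite author's own statement) =====
-- stated objective: alternative
-- what changed: Instead of testing membership for every triangular pair (i,j), B partitions range(num_states) once into accepting and non-accepting lists and marks exactly the cross product of the two partitions in the zero table.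
import Mathlib
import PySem

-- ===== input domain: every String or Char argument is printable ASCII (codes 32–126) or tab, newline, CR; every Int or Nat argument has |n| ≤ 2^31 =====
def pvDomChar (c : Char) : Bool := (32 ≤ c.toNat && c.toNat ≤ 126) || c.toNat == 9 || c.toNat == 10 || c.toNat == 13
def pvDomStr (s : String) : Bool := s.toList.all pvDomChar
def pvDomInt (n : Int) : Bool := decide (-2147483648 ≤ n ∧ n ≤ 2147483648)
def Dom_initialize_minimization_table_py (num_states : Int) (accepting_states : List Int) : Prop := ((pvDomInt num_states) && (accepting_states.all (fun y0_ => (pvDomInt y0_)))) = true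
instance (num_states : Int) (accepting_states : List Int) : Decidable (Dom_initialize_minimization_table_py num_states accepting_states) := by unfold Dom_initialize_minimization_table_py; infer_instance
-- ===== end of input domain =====

-- B partitions range(n) into accepting/non-accepting lists once, then marks the cross product
-- of the two partitions instead of testing membership for every triangular pair (objective: alternative).

-- ===== PORT A =====
-- A: build n×n zero table, then for i in range(n), j in range(i): if memberships differ,
-- table[i][j] = table[j][i] = 1.  The table is kept as Array (Array Int) (a Python list is a
-- dynamic array; the in-place cell assignments are O(1) updates); indices satisfy
-- 0 ≤ j < i < n, so .toNat/setIfInBounds is exact for those Python assignments.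
def initialize_minimization_table_py (num_states : Int) (accepting_states : List Int) : List (List Int) :=
  let table : Array (Array Int) :=
    ((PySem.List.pyRange 0 num_states 1).map
      (fun _ => ((PySem.List.pyRange 0 num_states 1).map (fun _ => (0 : Int))).toArray)).toArray
  let final := (PySem.List.pyRange 0 num_states 1).foldl (fun t i =>
    (PySem.List.pyRange 0 i 1).foldl (fun t j =>
      if (accepting_states.contains i) != (accepting_states.contains j) then
        ((t.modify i.toNat (fun row => row.setIfInBounds j.toNat 1)).modify j.toNat
          (fun row => row.setIfInBounds i.toNat 1))
      else t) t) table
  final.toList.map (fun row => row.toList)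

-- ===== PORT B =====
-- B: acc = [s in range(n) if s in accepting], non = [s in range(n) if s not in accepting],
-- zero table [[0]*n]*n, then for i in acc: for j in non: table[i][j] = table[j][i] = 1.
-- Indices are drawn from range(n), so .toNat/List.set is exact for those Python assignments.
def initialize_minimization_table_py_alt (num_states : Int) (accepting_states : List Int) : List (List Int) :=
  let acc := (PySem.List.pyRange 0 num_states 1).filter (fun s => accepting_states.contains s)
  let non := (PySem.List.pyRange 0 num_states 1).filter (fun s => !(accepting_states.contains s))
  let table := (PySem.List.pyRange 0 num_states 1).map (fun _ => List.replicate num_states.toNat (0 : Int))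
  acc.foldl (fun t i =>
    non.foldl (fun t j =>
      (t.modify i.toNat (fun row => row.set j.toNat 1)).modify j.toNat
        (fun row => row.set i.toNat 1)) t) table

-- ===== PRECONDITION & SPEC =====
def Spec_initialize_minimization_table_py (num_states : Int) (accepting_states : List Int) (out : List (List Int)) : Prop := out = initialize_minimization_table_py_alt num_states accepting_states
instance (num_states : Int) (accepting_states : List Int) (out : List (List Int)) : Decidable (Spec_initialize_minimization_table_py num_states accepting_states out) := by unfold Spec_initialize_minimization_table_py; infer_instance

-- ===== CLAIM (what is proved, stated in full; the proofs are below) =====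
def Claim_equal_initialize_minimization_table_py : Prop := ∀ (num_states : Int) (accepting_states : List Int), Dom_initialize_minimization_table_py num_states accepting_states → Spec_initialize_minimization_table_py num_states accepting_states (initialize_minimization_table_py num_states accepting_states)

-- ===== LEMMAS AND PROOFS =====

-- a table as a pure map: cell (a,b) is 1 iff c a b
def pvTbl2 (N : Int) (c : Int → Int → Bool) : List (List Int) :=
  (PySem.List.pyRange 0 N 1).map (fun a =>
    (PySem.List.pyRange 0 N 1).map (fun b => if c a b then (1 : Int) else 0))

theorem pvTbl2_congr (N : Int) (c c' : Int → Int → Bool)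
    (h : ∀ a b, 0 ≤ a → a < N → 0 ≤ b → b < N → c a b = c' a b) :
    pvTbl2 N c = pvTbl2 N c' := by
  unfold pvTbl2
  apply List.map_congr_left
  intro a ha
  rw [PySem.List.mem_pyRange_one] at ha
  apply List.map_congr_left
  intro b hb
  rw [PySem.List.mem_pyRange_one] at hb
  rw [h a b ha.1 ha.2 hb.1 hb.2]

-- A-side: the evolving table where cell (a,b) is 1 iff memberships differ and c a b holds
def pvTbl (N : Int) (acc : List Int) (c : Int → Int → Bool) : List (List Int) :=
  pvTbl2 N (fun a b => (acc.contains a != acc.contains b) && c a b)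

-- condition after outer iterations < i plus inner iterations < m of outer iteration i
def pvC (i m a b : Int) : Bool := decide (max a b < i) || (decide (max a b = i) && decide (min a b < m))

theorem pvCell_congr (d c c' : Bool) (h : d = true → c = c') :
    (if d && c then (1 : Int) else 0) = (if d && c' then 1 else 0) := by
  cases d
  · simp
  · simp [h rfl]

theorem pvTbl_congr (N : Int) (acc : List Int) (c c' : Int → Int → Bool)
    (h : ∀ a b, 0 ≤ a → a < N → 0 ≤ b → b < N →
      (acc.contains a != acc.contains b) = true → c a b = c' a b) :
    pvTbl N acc c = pvTbl N acc c' := by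
  unfold pvTbl pvTbl2
  apply List.map_congr_left
  intro a ha
  rw [PySem.List.mem_pyRange_one] at ha
  apply List.map_congr_left
  intro b hb
  rw [PySem.List.mem_pyRange_one] at hb
  exact pvCell_congr _ _ _ (h a b ha.1 ha.2 hb.1 hb.2)

theorem pvRow_set (f : Int → Int) (N q v : Int) (hq0 : 0 ≤ q) (_hqN : q < N) :
    ((PySem.List.pyRange 0 N 1).map f).set q.toNat v
      = (PySem.List.pyRange 0 N 1).map (fun b => if b = q then v else f b) := by
  apply List.ext_getElem
  · simp
  · intro k h1 h2
    have hkN : k < (N - 0).toNat := by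
      simpa using h2
    have hk : ∀ (h : k < (PySem.List.pyRange 0 N 1).length),
        (PySem.List.pyRange 0 N 1)[k] = (k : Int) := by
      intro h
      rw [PySem.List.getElem_pyRange_one]; omega
    simp only [List.getElem_set, List.getElem_map, hk]
    by_cases h : q.toNat = k
    · rw [if_pos h, if_pos (by omega)]
    · rw [if_neg h, if_neg (by omega)]

-- the double in-place assignment table[i][j] = table[j][i] = 1 on a pure-map matrix
theorem pvMatrix_update (F : Int → Int → Int) (N i j : Int)
    (hi0 : 0 ≤ i) (hiN : i < N) (hj0 : 0 ≤ j) (hjN : j < N) (hij : i ≠ j) :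
    (((PySem.List.pyRange 0 N 1).map (fun a => (PySem.List.pyRange 0 N 1).map (fun b => F a b))).modify
        i.toNat (fun row => row.set j.toNat 1)).modify j.toNat (fun row => row.set i.toNat 1)
      = (PySem.List.pyRange 0 N 1).map (fun a => (PySem.List.pyRange 0 N 1).map (fun b =>
          if (a = i ∧ b = j) ∨ (a = j ∧ b = i) then (1 : Int) else F a b)) := by
  apply List.ext_getElem
  · simp
  · intro k h1 h2
    have hkN : k < (N - 0).toNat := by
      simpa using h2
    have hk : ∀ (h : k < (PySem.List.pyRange 0 N 1).length),
        (PySem.List.pyRange 0 N 1)[k] = (k : Int) := by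
      intro h
      rw [PySem.List.getElem_pyRange_one]; omega
    simp only [List.getElem_modify, List.getElem_map, hk]
    by_cases hkj : j.toNat = k
    · have hki : ¬ (i.toNat = k) := by omega
      rw [if_pos hkj, if_neg hki]
      rw [pvRow_set _ N i 1 hi0 hiN]
      apply List.map_congr_left
      intro b hb
      rw [PySem.List.mem_pyRange_one] at hb
      by_cases hbi : b = i
      · rw [if_pos hbi, if_pos (by omega)]
      · rw [if_neg hbi, if_neg (by omega)]
    · rw [if_neg hkj]
      by_cases hki : i.toNat = k
      · rw [if_pos hki]
        rw [pvRow_set _ N j 1 hj0 hjN]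
        apply List.map_congr_left
        intro b hb
        rw [PySem.List.mem_pyRange_one] at hb
        by_cases hbj : b = j
        · rw [if_pos hbj, if_pos (by omega)]
        · rw [if_neg hbj, if_neg (by omega)]
      · rw [if_neg hki]
        apply List.map_congr_left
        intro b hb
        rw [PySem.List.mem_pyRange_one] at hb
        rw [if_neg (by omega)]

theorem pvBne_symm (x y : Bool) : (x != y) = (y != x) := by
  cases x <;> cases y <;> rfl

-- one inner step of A: processing j at outer i advances pvC i j to pvC i (j+1)
theorem pvInner_step (N : Int) (acc : List Int) (i j : Int)
    (hj0 : 0 ≤ j) (hji : j < i) (hiN : i < N) :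
    (if (acc.contains i != acc.contains j) then
       (((pvTbl N acc (pvC i j)).modify i.toNat (fun row => row.set j.toNat 1)).modify j.toNat
          (fun row => row.set i.toNat 1))
     else pvTbl N acc (pvC i j)) = pvTbl N acc (pvC i (j + 1)) := by
  by_cases hd : (acc.contains i != acc.contains j) = true
  · rw [if_pos hd]
    unfold pvTbl pvTbl2
    rw [pvMatrix_update _ N i j (by omega) hiN hj0 (by omega) (by omega)]
    apply List.map_congr_left
    intro a ha
    rw [PySem.List.mem_pyRange_one] at ha
    apply List.map_congr_left
    intro b hb
    rw [PySem.List.mem_pyRange_one] at hb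
    dsimp only
    by_cases hp : (a = i ∧ b = j) ∨ (a = j ∧ b = i)
    · rw [if_pos hp]
      have hdab : (acc.contains a != acc.contains b) = true := by
        rcases hp with ⟨h1, h2⟩ | ⟨h1, h2⟩
        · rw [h1, h2]; exact hd
        · rw [h1, h2, pvBne_symm]; exact hd
      have hc : pvC i (j + 1) a b = true := by
        rw [Bool.eq_iff_iff]
        simp only [pvC, Bool.or_eq_true, Bool.and_eq_true, decide_eq_true_eq]
        rcases hp with ⟨h1, h2⟩ | ⟨h1, h2⟩ <;> subst h1 <;> subst h2 <;> simp <;> omega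
      rw [if_pos (by rw [hdab, hc]; rfl)]
    · rw [if_neg hp]
      apply pvCell_congr
      intro hdab
      rw [Bool.eq_iff_iff]
      simp only [pvC, Bool.or_eq_true, Bool.and_eq_true, decide_eq_true_eq]
      omega
  · rw [if_neg hd]
    apply pvTbl_congr
    intro a b ha0 haN hb0 hbN hdab
    have hnp : ¬ ((a = i ∧ b = j) ∨ (a = j ∧ b = i)) := by
      rintro (⟨h1, h2⟩ | ⟨h1, h2⟩)
      · rw [h1, h2] at hdab; exact hd hdab
      · rw [h1, h2, pvBne_symm] at hdab; exact hd hdab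
    rw [Bool.eq_iff_iff]
    simp only [pvC, Bool.or_eq_true, Bool.and_eq_true, decide_eq_true_eq]
    omega

-- A's inner loop: folding j over range(m, i) takes pvC i m to pvC i i
theorem pvInner (N : Int) (acc : List Int) (i : Int) (hiN : i < N) (hi0 : 0 ≤ i) :
    ∀ (m : Int), 0 ≤ m → m ≤ i →
    (PySem.List.pyRange m i 1).foldl (fun t j =>
      if (acc.contains i != acc.contains j) then
        ((t.modify i.toNat (fun row => row.set j.toNat 1)).modify j.toNat (fun row => row.set i.toNat 1))
      else t) (pvTbl N acc (pvC i m)) = pvTbl N acc (pvC i i) := by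
  intro m hm0 hmi
  generalize hfuel : (i - m).toNat = k
  induction k generalizing m with
  | zero =>
      have : m = i := by omega
      subst this
      rw [PySem.List.pyRange_one_eq_nil (by omega)]
      rfl
  | succ k ih =>
      rw [PySem.List.pyRange_one_cons (by omega)]
      simp only [List.foldl_cons]
      rw [pvInner_step N acc i m hm0 (by omega) hiN]
      exact ih (m + 1) (by omega) (by omega) (by omega)

-- A's outer loop: folding i over range(k, N) takes (max < k) to (max < N)
theorem pvOuter (N : Int) (acc : List Int) :
    ∀ (k : Int), 0 ≤ k → k ≤ N →
    (PySem.List.pyRange k N 1).foldl (fun t i =>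
      (PySem.List.pyRange 0 i 1).foldl (fun t j =>
        if (acc.contains i != acc.contains j) then
          ((t.modify i.toNat (fun row => row.set j.toNat 1)).modify j.toNat (fun row => row.set i.toNat 1))
        else t) t) (pvTbl N acc (fun a b => decide (max a b < k)))
      = pvTbl N acc (fun a b => decide (max a b < N)) := by
  intro k hk0 hkN
  generalize hfuel : (N - k).toNat = fuel
  induction fuel generalizing k with
  | zero =>
      have : k = N := by omega
      subst this
      rw [PySem.List.pyRange_one_eq_nil (by omega)]
      rfl
  | succ fuel ih =>
      rw [PySem.List.pyRange_one_cons (by omega)]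
      simp only [List.foldl_cons]
      have h1 : pvTbl N acc (fun a b => decide (max a b < k)) = pvTbl N acc (pvC k 0) := by
        apply pvTbl_congr
        intro a b ha0 _ hb0 _ _
        rw [Bool.eq_iff_iff]
        simp only [pvC, Bool.or_eq_true, Bool.and_eq_true, decide_eq_true_eq]
        omega
      rw [h1, pvInner N acc k (by omega) hk0 0 le_rfl hk0]
      have h2 : pvTbl N acc (pvC k k) = pvTbl N acc (fun a b => decide (max a b < k + 1)) := by
        apply pvTbl_congr
        intro a b ha0 haN hb0 hbN hdab
        have hab : a ≠ b := by
          intro h; subst h; simp at hdab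
        rw [Bool.eq_iff_iff]
        simp only [pvC, Bool.or_eq_true, Bool.and_eq_true, decide_eq_true_eq]
        omega
      rw [h2]
      exact ih (k + 1) (by omega) (by omega) (by omega)

-- bridge from the Array-state fold of port A to the List-state fold the lemmas above describe
theorem pvMap_modify_list {α β : Type} (g : α → β) (l : List α) (n : Nat)
    (fA : α → α) (fL : β → β) (h : ∀ x, g (fA x) = fL (g x)) :
    (l.modify n fA).map g = (l.map g).modify n fL := by
  apply List.ext_getElem
  · simp
  · intro k h1 h2
    simp only [List.getElem_map, List.getElem_modify]
    by_cases hk : n = k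
    · simp [hk, h]
    · simp [hk]

def pvPhi (t : Array (Array Int)) : List (List Int) := t.toList.map (fun row => row.toList)

theorem pvPhi_modify (t : Array (Array Int)) (n : Nat) (fA : Array Int → Array Int)
    (fL : List Int → List Int) (h : ∀ r, (fA r).toList = fL r.toList) :
    pvPhi (t.modify n fA) = (pvPhi t).modify n fL := by
  unfold pvPhi
  rw [Array.toList_modify]
  exact pvMap_modify_list _ _ _ _ _ h

theorem pvPhi_step (acc : List Int) (i j : Int) (t : Array (Array Int)) :
    pvPhi (if (acc.contains i) != (acc.contains j) then
        ((t.modify i.toNat (fun row => row.setIfInBounds j.toNat 1)).modify j.toNat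
          (fun row => row.setIfInBounds i.toNat 1))
      else t)
    = (if (acc.contains i) != (acc.contains j) then
        (((pvPhi t).modify i.toNat (fun row => row.set j.toNat 1)).modify j.toNat
          (fun row => row.set i.toNat 1))
      else pvPhi t) := by
  by_cases hd : (acc.contains i != acc.contains j) = true
  · rw [if_pos hd, if_pos hd]
    rw [pvPhi_modify _ _ _ (fun row => row.set i.toNat 1)
          (fun r => Array.toList_setIfInBounds),
        pvPhi_modify _ _ _ (fun row => row.set j.toNat 1)
          (fun r => Array.toList_setIfInBounds)]
  · rw [if_neg hd, if_neg hd]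

theorem pvPhi_fold (N : Int) (acc : List Int) (t0 : Array (Array Int)) :
    pvPhi ((PySem.List.pyRange 0 N 1).foldl (fun t i =>
      (PySem.List.pyRange 0 i 1).foldl (fun t j =>
        if (acc.contains i) != (acc.contains j) then
          ((t.modify i.toNat (fun row => row.setIfInBounds j.toNat 1)).modify j.toNat
            (fun row => row.setIfInBounds i.toNat 1))
        else t) t) t0)
    = (PySem.List.pyRange 0 N 1).foldl (fun t i =>
        (PySem.List.pyRange 0 i 1).foldl (fun t j =>
          if (acc.contains i) != (acc.contains j) then
            ((t.modify i.toNat (fun row => row.set j.toNat 1)).modify j.toNat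
              (fun row => row.set i.toNat 1))
          else t) t) (pvPhi t0) := by
  refine (List.foldl_hom pvPhi ?_).symm
  intro t i
  refine List.foldl_hom pvPhi ?_
  intro t' j
  exact (pvPhi_step acc i j t').symm

-- A equals the pure membership-difference table
theorem pvA_eq (N : Int) (acc : List Int) :
    initialize_minimization_table_py N acc
      = pvTbl2 N (fun a b => acc.contains a != acc.contains b) := by
  unfold initialize_minimization_table_py
  dsimp only
  have hb := pvPhi_fold N acc (((PySem.List.pyRange 0 N 1).map
      (fun _ => ((PySem.List.pyRange 0 N 1).map (fun _ => (0 : Int))).toArray)).toArray)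
  unfold pvPhi at hb
  rw [hb]
  have hphi0 : pvPhi (((PySem.List.pyRange 0 N 1).map
      (fun _ => ((PySem.List.pyRange 0 N 1).map (fun _ => (0 : Int))).toArray)).toArray)
      = (PySem.List.pyRange 0 N 1).map
          (fun _ => (PySem.List.pyRange 0 N 1).map (fun _ => (0 : Int))) := by
    unfold pvPhi
    simp
  unfold pvPhi at hphi0
  rw [hphi0]
  by_cases hN : 0 ≤ N
  · have hinit : (PySem.List.pyRange 0 N 1).map
        (fun _ => (PySem.List.pyRange 0 N 1).map (fun _ => (0 : Int)))
        = pvTbl N acc (fun a b => decide (max a b < 0)) := by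
      unfold pvTbl pvTbl2
      apply List.map_congr_left
      intro a ha
      rw [PySem.List.mem_pyRange_one] at ha
      apply List.map_congr_left
      intro b hb
      rw [PySem.List.mem_pyRange_one] at hb
      have : ¬ (max a b < 0) := by omega
      simp [this]
    rw [hinit, pvOuter N acc 0 le_rfl hN]
    unfold pvTbl
    apply pvTbl2_congr
    intro a b ha0 haN hb0 hbN
    have : max a b < N := by omega
    simp [this]
  · unfold pvTbl2
    rw [PySem.List.pyRange_one_eq_nil (by omega)]
    rfl

-- B-side lemmas ------------------------------------------------------------

-- the double assignment on a pure table, in pvTbl2 form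
theorem pvUpdB (c : Int → Int → Bool) (N i j : Int)
    (hi0 : 0 ≤ i) (hiN : i < N) (hj0 : 0 ≤ j) (hjN : j < N) (hij : i ≠ j) :
    ((pvTbl2 N c).modify i.toNat (fun row => row.set j.toNat 1)).modify j.toNat
        (fun row => row.set i.toNat 1)
      = pvTbl2 N (fun a b => decide ((a = i ∧ b = j) ∨ (a = j ∧ b = i)) || c a b) := by
  unfold pvTbl2
  rw [pvMatrix_update (fun a b => if c a b then (1 : Int) else 0) N i j hi0 hiN hj0 hjN hij]
  apply List.map_congr_left
  intro a ha
  apply List.map_congr_left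
  intro b hb
  dsimp only
  by_cases hp : (a = i ∧ b = j) ∨ (a = j ∧ b = i)
  · rw [if_pos hp]
    simp [hp]
  · rw [if_neg hp]
    simp [hp]

-- B's inner loop over the non-accepting partition
theorem pvInnerB (N i : Int) (hi0 : 0 ≤ i) (hiN : i < N) :
    ∀ (ns : List Int) (c : Int → Int → Bool),
    (∀ j ∈ ns, 0 ≤ j ∧ j < N ∧ j ≠ i) →
    ns.foldl (fun t j =>
      (t.modify i.toNat (fun row => row.set j.toNat 1)).modify j.toNat
        (fun row => row.set i.toNat 1)) (pvTbl2 N c)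
    = pvTbl2 N (fun a b => c a b || (decide (a = i) && ns.contains b)
        || (decide (b = i) && ns.contains a)) := by
  intro ns
  induction ns with
  | nil =>
      intro c _
      simp only [List.foldl_nil]
      apply pvTbl2_congr
      intro a b _ _ _ _
      simp
  | cons j ns ih =>
      intro c hns
      obtain ⟨hj0, hjN, hji⟩ := hns j (List.mem_cons_self)
      simp only [List.foldl_cons]
      rw [pvUpdB c N i j hi0 hiN hj0 hjN (by omega)]
      rw [ih _ (fun j' hj' => hns j' (List.mem_cons_of_mem _ hj'))]
      apply pvTbl2_congr
      intro a b _ _ _ _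
      rw [Bool.eq_iff_iff]
      simp only [Bool.or_eq_true, Bool.and_eq_true, decide_eq_true_eq,
        List.contains_cons, beq_iff_eq]
      tauto

-- B's outer loop over the accepting partition
theorem pvOuterB (N : Int) (accs : List Int) (ns : List Int)
    (hns : ∀ j ∈ ns, 0 ≤ j ∧ j < N ∧ accs.contains j = false) :
    ∀ (as_ : List Int) (c : Int → Int → Bool),
    (∀ i ∈ as_, 0 ≤ i ∧ i < N ∧ accs.contains i = true) →
    as_.foldl (fun t i =>
      ns.foldl (fun t j =>
        (t.modify i.toNat (fun row => row.set j.toNat 1)).modify j.toNat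
          (fun row => row.set i.toNat 1)) t) (pvTbl2 N c)
    = pvTbl2 N (fun a b => c a b || (as_.contains a && ns.contains b)
        || (as_.contains b && ns.contains a)) := by
  intro as_
  induction as_ with
  | nil =>
      intro c _
      simp only [List.foldl_nil]
      apply pvTbl2_congr
      intro a b _ _ _ _
      simp
  | cons i as_ ih =>
      intro c has
      obtain ⟨hi0, hiN, hiacc⟩ := has i (List.mem_cons_self)
      simp only [List.foldl_cons]
      rw [pvInnerB N i hi0 hiN ns c
        (fun j hj => ⟨(hns j hj).1, (hns j hj).2.1, by
          intro h; subst h; rw [(hns j hj).2.2] at hiacc; exact Bool.false_ne_true hiacc⟩)]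
      rw [ih _ (fun i' hi' => has i' (List.mem_cons_of_mem _ hi'))]
      apply pvTbl2_congr
      intro a b _ _ _ _
      rw [Bool.eq_iff_iff]
      simp only [Bool.or_eq_true, Bool.and_eq_true, decide_eq_true_eq,
        List.contains_cons, beq_iff_eq]
      tauto

theorem pvContains_filter (p : Int → Bool) (N a : Int) (ha0 : 0 ≤ a) (haN : a < N) :
    ((PySem.List.pyRange 0 N 1).filter p).contains a = p a := by
  rw [Bool.eq_iff_iff, List.contains_iff_exists_mem_beq]
  constructor
  · rintro ⟨a', ha', hbeq⟩
    have : a = a' := by simpa using hbeq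
    subst this
    exact (List.mem_filter.mp ha').2
  · intro hp
    exact ⟨a, List.mem_filter.mpr ⟨PySem.List.mem_pyRange_one.mpr ⟨ha0, haN⟩, hp⟩, by simp⟩

-- B's zero table is the pure all-false table
theorem pvInitB (N : Int) :
    (PySem.List.pyRange 0 N 1).map (fun _ => List.replicate N.toNat (0 : Int))
      = pvTbl2 N (fun _ _ => false) := by
  unfold pvTbl2
  apply List.map_congr_left
  intro a _
  apply List.ext_getElem
  · simp [PySem.List.length_pyRange_one]
  · intro k h1 h2
    simp

-- B equals the pure membership-difference table
theorem pvB_eq (N : Int) (acc : List Int) :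
    initialize_minimization_table_py_alt N acc
      = pvTbl2 N (fun a b => acc.contains a != acc.contains b) := by
  unfold initialize_minimization_table_py_alt
  dsimp only
  rw [pvInitB N]
  rw [pvOuterB N acc ((PySem.List.pyRange 0 N 1).filter (fun s => !(acc.contains s)))
      (fun j hj => by
        rw [List.mem_filter, PySem.List.mem_pyRange_one] at hj
        exact ⟨hj.1.1, hj.1.2, by simpa using hj.2⟩)
      ((PySem.List.pyRange 0 N 1).filter (fun s => acc.contains s))
      (fun _ _ => false)
      (fun i hi => by
        rw [List.mem_filter, PySem.List.mem_pyRange_one] at hi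
        exact ⟨hi.1.1, hi.1.2, hi.2⟩)]
  apply pvTbl2_congr
  intro a b ha0 haN hb0 hbN
  rw [pvContains_filter (fun s => acc.contains s) N a ha0 haN,
      pvContains_filter (fun s => acc.contains s) N b hb0 hbN,
      pvContains_filter (fun s => !(acc.contains s)) N a ha0 haN,
      pvContains_filter (fun s => !(acc.contains s)) N b hb0 hbN]
  cases acc.contains a <;> cases acc.contains b <;> rfl

-- ===== VERDICT (by name: the statement is the Claim_ definition above) =====
theorem initialize_minimization_table_py_spec : Claim_equal_initialize_minimization_table_py := by
  intro N acc _
  unfold Spec_initialize_minimization_table_py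
  rw [pvA_eq, pvB_eq]
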